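-- pv_equiv track=rewrite | github.com/gabrielogregorio/safira | interpretador/interpretador.py | verifica_se_tem
-- ===== SOURCE A (Python) =====
-- def verifica_se_tem(linha, a_buscar):
--     #Interpretador.log(self, "verifica_se_tem")
--
--     analisar = True
--     lista = []
--
--     for caractere in range(len(linha)):
--         if linha[caractere] == '"' and analisar == True:
--             analisar = False
--
--         elif linha[caractere] == '"' and analisar == False:
--             analisar = True
--
--         if analisar:
--             if len(linha) >= caractere + len(a_buscar):
--
--                 if linha[caractere: caractere + len(a_buscar)] == a_buscar:
--                     lista.append([caractere, caractere + len(a_buscar)])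
--
--     return lista
-- ===== SOURCE B (Python) =====
-- def verifica_se_tem(linha, a_buscar):
--     n = len(linha)
--     m = len(a_buscar)
--     # one pass: parity of double quotes seen up to and including each position
--     par = []
--     even = True
--     for ch in linha:
--         if ch == '"':
--             even = not even
--         par.append(even)
--     if m == 0:
--         return [[c, c] for c in range(n) if par[c]]
--     res = []
--     i = linha.find(a_buscar)
--     while i != -1:
--         if par[i]:
--             res.append([i, i + m])
--         i = linha.find(a_buscar, i + 1)
--     return res
-- ===== Notes on version B (the rewrite author's own statement) =====
-- stated objective: faster
-- what changed: Instead of toggling a quote flag per index and comparing a fresh length-m slice at every position, B precomputes the quote-parity prefix once and enumerates match positions with repeated str.find, filtering them by parity.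
import Mathlib
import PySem

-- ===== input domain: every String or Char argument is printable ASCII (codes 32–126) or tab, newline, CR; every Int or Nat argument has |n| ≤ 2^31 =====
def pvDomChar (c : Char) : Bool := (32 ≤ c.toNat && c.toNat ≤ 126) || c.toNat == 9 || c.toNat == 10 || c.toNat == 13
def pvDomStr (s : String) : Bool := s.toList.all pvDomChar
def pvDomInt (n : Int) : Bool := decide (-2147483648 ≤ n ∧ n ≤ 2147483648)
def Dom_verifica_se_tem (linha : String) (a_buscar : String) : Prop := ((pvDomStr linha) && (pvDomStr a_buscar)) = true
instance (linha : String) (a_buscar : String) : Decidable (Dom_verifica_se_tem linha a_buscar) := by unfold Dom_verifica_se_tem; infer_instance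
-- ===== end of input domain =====

-- B replaces A's per-index slice comparison under a toggled quote flag by a one-pass quote-parity
-- prefix plus repeated library substring search (str.find), filtering found positions by parity;
-- measurably faster by a constant factor.


-- ===== PORT A =====
-- literal transliteration of A: one loop over range(len(linha)) carrying (analisar, lista)
def verifica_se_tem (linha : String) (a_buscar : String) : List (List Int) :=
  let l : List Char := linha.toList
  let b : List Char := a_buscar.toList
  ((List.range l.length).foldl (fun (st : Bool × List (List Int)) (caractere : Nat) =>
      let analisar : Bool :=
        if PySem.List.pyGet? l (caractere : Int) = some '"' ∧ st.1 = true then false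
        else if PySem.List.pyGet? l (caractere : Int) = some '"' ∧ st.1 = false then true
        else st.1
      let lista : List (List Int) :=
        if analisar then
          if l.length ≥ caractere + b.length then
            if PySem.List.slice l (some (caractere : Int)) (some ((caractere : Int) + (b.length : Int))) = b then
              st.2 ++ [[(caractere : Int), (caractere : Int) + (b.length : Int)]]
            else st.2
          else st.2
        else st.2
      (analisar, lista)) (true, [])).2

-- ===== PORT B =====
-- Source B's while-loop over linha.find(a_buscar, i+1); fuel n+1 only makes the loop total (i strictly grows)
def pvFindLoop (linha : String) (a_buscar : String) (par : List Bool) (m : Nat) :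
    Nat → Int → List (List Int)
  | 0, _ => []
  | fuel + 1, i =>
    if i = -1 then []
    else
      (if par.getD i.toNat false then [[i, i + (m : Int)]] else [])
        ++ pvFindLoop linha a_buscar par m fuel (PySem.Str.findFrom linha a_buscar (i + 1))

def verifica_se_tem_alt (linha : String) (a_buscar : String) : List (List Int) :=
  let l : List Char := linha.toList
  let n : Nat := l.length
  let m : Nat := a_buscar.toList.length
  -- par[c] = "number of '\"' in linha[:c+1] is even"
  let par : List Bool :=
    (l.foldl (fun (st : Bool × List Bool) ch =>
        let even := if ch = '"' then !st.1 else st.1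
        (even, st.2 ++ [even])) (true, ([] : List Bool))).2
  if m = 0 then
    (List.range n).filterMap (fun c => if par.getD c false then some [(c : Int), (c : Int)] else none)
  else
    pvFindLoop linha a_buscar par m (n + 1) (PySem.Str.find linha a_buscar)

-- ===== PRECONDITION & SPEC =====
def Spec_verifica_se_tem (linha : String) (a_buscar : String) (out : List (List Int)) : Prop := out = verifica_se_tem_alt linha a_buscar
instance (linha : String) (a_buscar : String) (out : List (List Int)) : Decidable (Spec_verifica_se_tem linha a_buscar out) := by unfold Spec_verifica_se_tem; infer_instance

-- ===== CLAIM (what is proved, stated in full; the proofs are below) =====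
def Claim_equal_verifica_se_tem : Prop := ∀ (linha : String) (a_buscar : String), Dom_verifica_se_tem linha a_buscar → Spec_verifica_se_tem linha a_buscar (verifica_se_tem linha a_buscar)

-- ===== LEMMAS AND PROOFS =====

def pvEven (s : List Char) : Bool := decide (s.count '"' % 2 = 0)

def pvF (l b : List Char) (c : Nat) : Option (List Int) :=
  if pvEven (l.take (c + 1)) = true ∧ b <+: l.drop c then
    some [(c : Int), (c : Int) + (b.length : Int)]
  else none

def pvSpecFrom (l b : List Char) (k : Nat) : List (List Int) :=
  (List.range' k (l.length - k)).filterMap (pvF l b)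

-- parity step
theorem pvEven_take_succ (l : List Char) (k : Nat) (hk : k < l.length) :
    pvEven (l.take (k + 1)) = if l[k] = '"' then !pvEven (l.take k) else pvEven (l.take k) := by
  have h : l.take (k + 1) = l.take k ++ [l[k]] := by
    rw [List.take_add_one]
    simp [List.getElem?_eq_getElem hk]
  rw [h]
  unfold pvEven
  rw [List.count_append, List.count_singleton]
  by_cases hc : l[k] = '"'
  · simp only [hc, beq_self_eq_true, if_true]
    rcases Nat.mod_two_eq_zero_or_one ((l.take k).count '"') with he | he <;>
      simp [Nat.add_mod, he]
  · simp [hc]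

theorem pvSlice_iff (l b : List Char) (c : Nat) :
    (PySem.List.slice l (some (c : Int)) (some ((c : Int) + (b.length : Int))) = b)
      ↔ b <+: l.drop c := by
  rw [PySem.List.slice_natCast_add, List.prefix_iff_eq_take, eq_comm]

theorem pvPrefix_len (l b : List Char) (c : Nat) (hc : c < l.length) (h : b <+: l.drop c) :
    c + b.length ≤ l.length := by
  have := h.length_le
  simp [List.length_drop] at this
  omega

theorem pvSpecFrom_nil (l b : List Char) (k : Nat)
    (h : ∀ c, k ≤ c → ¬ b <+: l.drop c) : pvSpecFrom l b k = [] := by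
  rw [pvSpecFrom, List.filterMap_eq_nil_iff]
  intro c hc
  rw [List.mem_range'_1] at hc
  exact if_neg (fun hcon => h c hc.1 hcon.2)

theorem pvA_inv (l b : List Char) (k : Nat) (hk : k ≤ l.length) :
    ((List.range k).foldl (fun (st : Bool × List (List Int)) (caractere : Nat) =>
      let analisar : Bool :=
        if PySem.List.pyGet? l (caractere : Int) = some '"' ∧ st.1 = true then false
        else if PySem.List.pyGet? l (caractere : Int) = some '"' ∧ st.1 = false then true
        else st.1
      let lista : List (List Int) :=
        if analisar then
          if l.length ≥ caractere + b.length then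
            if PySem.List.slice l (some (caractere : Int)) (some ((caractere : Int) + (b.length : Int))) = b then
              st.2 ++ [[(caractere : Int), (caractere : Int) + (b.length : Int)]]
            else st.2
          else st.2
        else st.2
      (analisar, lista)) (true, []))
      = (pvEven (l.take k), (List.range k).filterMap (pvF l b)) := by
  induction k with
  | zero => simp [pvEven]
  | succ k ih =>
    have hk' : k < l.length := hk
    rw [List.range_succ, List.foldl_append, List.filterMap_append, ih (le_of_lt hk')]
    have hget : PySem.List.pyGet? l (k : Int) = some l[k] :=
      PySem.List.pyGet?_ofNat l k hk'
    simp only [List.foldl_cons, List.foldl_nil]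
    have han : (if PySem.List.pyGet? l (k : Int) = some '"' ∧ pvEven (l.take k) = true then false
        else if PySem.List.pyGet? l (k : Int) = some '"' ∧ pvEven (l.take k) = false then true
        else pvEven (l.take k)) = pvEven (l.take (k + 1)) := by
      rw [pvEven_take_succ l k hk', hget]
      by_cases hc : l[k] = '"' <;> cases hpe : pvEven (l.take k) <;> simp [hc]
    rw [han]
    rw [Prod.mk.injEq]
    refine ⟨rfl, ?_⟩
    by_cases he : pvEven (l.take (k + 1)) = true
    · simp only [he, if_true]
      by_cases hp : b <+: l.drop k
      · have hlen : l.length ≥ k + b.length := pvPrefix_len l b k hk' hp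
        have hsl : PySem.List.slice l (some (k : Int)) (some ((k : Int) + (b.length : Int))) = b :=
          (pvSlice_iff l b k).mpr hp
        simp [hlen, hsl, pvF, he, hp]
      · have hsl : ¬ PySem.List.slice l (some (k : Int)) (some ((k : Int) + (b.length : Int))) = b :=
          fun h => hp ((pvSlice_iff l b k).mp h)
        simp only [pvF, he, hp, and_false, if_false, List.filterMap_cons]
        split_ifs <;> simp_all
    · simp only [he]
      simp [pvF, he]

def pvParList (e : Bool) : List Char → List Bool
  | [] => []
  | ch :: t =>
    let e' := if ch = '"' then !e else e
    e' :: pvParList e' t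

theorem pvPar_foldl (l : List Char) (e : Bool) (acc : List Bool) :
    (l.foldl (fun (st : Bool × List Bool) ch =>
        let even := if ch = '"' then !st.1 else st.1
        (even, st.2 ++ [even])) (e, acc)).2 = acc ++ pvParList e l := by
  induction l generalizing e acc with
  | nil => simp [pvParList]
  | cons ch t ih => simp [pvParList, ih, List.append_assoc]

theorem pvParList_getD (l : List Char) (e : Bool) (c : Nat) (hc : c < l.length) :
    (pvParList e l).getD c false = (if pvEven (l.take (c + 1)) = true then e else !e) := by
  induction l generalizing e c with
  | nil => simp at hc
  | cons ch t ih =>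
    cases c with
    | zero =>
      by_cases hch : ch = '"' <;> simp [pvParList, pvEven, hch]
    | succ c =>
      have hc' : c < t.length := by simpa using hc
      rw [show pvParList e (ch :: t) = (if ch = '"' then !e else e) ::
            pvParList (if ch = '"' then !e else e) t from rfl]
      rw [List.getD_cons_succ, ih (if ch = '"' then !e else e) c hc']
      have htake : (ch :: t).take (c + 1 + 1) = ch :: t.take (c + 1) := rfl
      rw [htake]
      by_cases hch : ch = '"'
      · simp only [hch, if_true]
        have : pvEven ('"' :: t.take (c + 1)) = !pvEven (t.take (c + 1)) := by
          simp only [pvEven, List.count_cons, beq_self_eq_true, if_true]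
          rcases Nat.mod_two_eq_zero_or_one ((t.take (c+1)).count '"') with h | h <;>
            simp [Nat.add_mod, h]
        rw [this]
        cases pvEven (t.take (c + 1)) <;> simp
      · simp only [hch, if_false]
        have : pvEven (ch :: t.take (c + 1)) = pvEven (t.take (c + 1)) := by
          simp [pvEven, hch]
        rw [this]

theorem pvNoMatch_below (l b : List Char) (k : Nat)
    (h : ¬ b <:+: l.drop k) : ∀ c, k ≤ c → ¬ b <+: l.drop c := by
  intro c hc hp
  apply h
  rw [← PySem.Chars.isIn_iff_infix, ← PySem.Chars.exists_prefix_drop_iff_isIn]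
  refine ⟨c - k, ?_⟩
  rwa [List.drop_drop, Nat.add_sub_cancel' hc]

theorem pvLoop_spec (linha a_buscar : String) (par : List Bool)
    (hb : a_buscar.toList ≠ [])
    (hpar : ∀ c, c < linha.toList.length →
      par.getD c false = pvEven (linha.toList.take (c + 1))) :
    ∀ (fuel k : Nat), k ≤ linha.toList.length →
      linha.toList.length + 1 ≤ fuel + k →
      pvFindLoop linha a_buscar par a_buscar.toList.length fuel
          (PySem.Chars.findFrom linha.toList a_buscar.toList (k : Int))
        = pvSpecFrom linha.toList a_buscar.toList k := by
  intro fuel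
  induction fuel with
  | zero => intro k hk hf; omega
  | succ fuel ih =>
    intro k hk hf
    set l := linha.toList with hl
    set b := a_buscar.toList with hbdef
    by_cases hne : PySem.Chars.findFrom l b (k : Int) = -1
    · rw [pvFindLoop, if_pos hne]
      have hnin : ¬ b <:+: l.drop k :=
        (PySem.Chars.findFrom_natCast_eq_neg_one_iff l b k hk).mp hne
      exact (pvSpecFrom_nil l b k (pvNoMatch_below l b k hnin)).symm
    · obtain ⟨hki, hpre, hmin⟩ := PySem.Chars.findFrom_natCast_spec l b k hk hne
      set i := PySem.Chars.findFrom l b (k : Int) with hi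
      have h0i : 0 ≤ i := le_trans (by exact_mod_cast Int.natCast_nonneg k) hki
      set j := i.toNat with hj
      have hij : i = (j : Nat) := (Int.toNat_of_nonneg h0i).symm
      have hkj : k ≤ j := by omega
      have hjn : j < l.length := by
        by_contra hcon
        have : l.drop j = [] := List.drop_eq_nil_iff.mpr (by omega)
        rw [this] at hpre
        exact hb (List.prefix_nil.mp hpre)
      -- split the spec at j
      have hsplit : pvSpecFrom l b k
          = (if pvEven (l.take (j + 1)) = true then [[(j : Int), (j : Int) + (b.length : Int)]] else [])
            ++ pvSpecFrom l b (j + 1) := by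
        rw [pvSpecFrom, pvSpecFrom]
        have hr1 : List.range' k (l.length - k)
            = List.range' k (j - k) ++ List.range' j ((l.length - (j + 1)) + 1) := by
          have h := @List.range'_append k (j - k) ((l.length - (j + 1)) + 1) 1
          simp only [one_mul] at h
          rw [Nat.add_sub_cancel' hkj] at h
          have h2 : j - k + (l.length - (j + 1) + 1) = l.length - k := by omega
          rw [h2] at h
          exact h.symm
        rw [hr1, List.filterMap_append, List.range'_succ, List.filterMap_cons]
        have hnil : List.filterMap (pvF l b) (List.range' k (j - k)) = [] := by
          rw [List.filterMap_eq_nil_iff]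
          intro c hc
          rw [List.mem_range'_1] at hc
          exact if_neg (fun hcon => hmin c hc.1 (by omega) hcon.2)
        rw [hnil, List.nil_append]
        have hfj : pvF l b j = if pvEven (l.take (j + 1)) = true
            then some [(j : Int), (j : Int) + (b.length : Int)] else none := by
          rw [pvF]
          by_cases he : pvEven (l.take (j + 1)) = true <;> simp [he, hpre]
        rw [hfj]
        by_cases he : pvEven (l.take (j + 1)) = true <;> simp [he]
      rw [hsplit, pvFindLoop, if_neg hne]
      congr 1
      · rw [hij]
        simp only [Int.toNat_natCast]
        simp only [hpar j hjn]
      · have harg : i + 1 = ((j + 1 : Nat) : Int) := by omega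
        rw [PySem.Str.findFrom_eq, harg, ← hl, ← hbdef]
        exact ih (j + 1) (by omega) (by omega)

theorem pvA_eq (linha a_buscar : String) :
    verifica_se_tem linha a_buscar = pvSpecFrom linha.toList a_buscar.toList 0 := by
  rw [verifica_se_tem]
  rw [pvA_inv linha.toList a_buscar.toList linha.toList.length (le_refl _)]
  rw [pvSpecFrom, Nat.sub_zero, ← List.range_eq_range']

theorem pvB_eq (linha a_buscar : String) :
    verifica_se_tem_alt linha a_buscar = pvSpecFrom linha.toList a_buscar.toList 0 := by
  rw [verifica_se_tem_alt]
  simp only [pvPar_foldl, List.nil_append]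
  have hpar : ∀ c, c < linha.toList.length →
      (pvParList true linha.toList).getD c false = pvEven (linha.toList.take (c + 1)) := by
    intro c hc
    rw [pvParList_getD linha.toList true c hc]
    by_cases he : pvEven (linha.toList.take (c + 1)) = true <;> simp [he]
  by_cases hm : a_buscar.toList.length = 0
  · simp only [hm, reduceIte]
    have hb : a_buscar.toList = [] := List.eq_nil_of_length_eq_zero hm
    rw [pvSpecFrom, Nat.sub_zero, ← List.range_eq_range']
    apply List.filterMap_congr
    intro c hcm
    rw [List.mem_range] at hcm
    rw [hpar c hcm, pvF, hb]
    simp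
  · rw [if_neg hm]
    have hb : a_buscar.toList ≠ [] := fun h => hm (by rw [h]; rfl)
    have h0 : PySem.Str.find linha a_buscar
        = PySem.Chars.findFrom linha.toList a_buscar.toList ((0 : Nat) : Int) := by
      rw [Nat.cast_zero, PySem.Chars.findFrom_zero]
      simp
    rw [h0]
    exact pvLoop_spec linha a_buscar (pvParList true linha.toList) hb hpar
      (linha.toList.length + 1) 0 (Nat.zero_le _) (by omega)

-- ===== VERDICT (by name: the statement is the Claim_ definition above) =====
theorem verifica_se_tem_spec : Claim_equal_verifica_se_tem := by
  intro linha a_buscar _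
  unfold Spec_verifica_se_tem
  rw [pvA_eq, pvB_eq]
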